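-- pv_equiv track=rewrite | github.com/Zeydel/Everybody-Codes | The Entertainment Hub/Quest2/Quest2_part1.py | get_arrows_to_pop_balloons
-- ===== SOURCE A (Python) =====
-- def get_arrows_to_pop_balloons(balloons):
--
--     # Init shot order
--     shots = ['R', 'G', 'B']
--
--     # Shot index
--     shot_idx = 0
--
--     # While there are still balloons left
--     while len(balloons) > 0:
--
--         # Get the currect shot
--         shot = shots[shot_idx % 3]
--
--         # Find the first balloon that is a different color
--         balloon_idx = 0
--
--         while balloon_idx < len(balloons) and balloons[balloon_idx] == shot:
--             balloon_idx += 1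
--
--         # Remove the frontmost balloons
--         balloons = balloons[balloon_idx+1:]
--
--         # Add one to shot index
--         shot_idx += 1
--
--     # Return shot index
--     return shot_idx
-- ===== SOURCE B (Python) =====
-- def get_arrows_to_pop_balloons(balloons):
--     # Single left-to-right pass: track shots fired and whether we are mid-run
--     # of balloons matching the current shot color (that shot still pending).
--     count = 0
--     pending = False
--     for c in balloons:
--         if c == 'RGB'[count % 3]:
--             pending = True
--         else:
--             count += 1
--             pending = False
--     return count + 1 if pending else count
-- ===== Notes on version B (the rewrite author's own statement) =====
-- stated objective: faster
-- what changed: Replaces the rescan-and-reslice while-loop (which rebuilds the remaining balloon string after every shot) with a single left-to-right pass keeping a shot counter and a pending-run flag, so no slicing or rescanning occurs.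
import Mathlib
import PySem

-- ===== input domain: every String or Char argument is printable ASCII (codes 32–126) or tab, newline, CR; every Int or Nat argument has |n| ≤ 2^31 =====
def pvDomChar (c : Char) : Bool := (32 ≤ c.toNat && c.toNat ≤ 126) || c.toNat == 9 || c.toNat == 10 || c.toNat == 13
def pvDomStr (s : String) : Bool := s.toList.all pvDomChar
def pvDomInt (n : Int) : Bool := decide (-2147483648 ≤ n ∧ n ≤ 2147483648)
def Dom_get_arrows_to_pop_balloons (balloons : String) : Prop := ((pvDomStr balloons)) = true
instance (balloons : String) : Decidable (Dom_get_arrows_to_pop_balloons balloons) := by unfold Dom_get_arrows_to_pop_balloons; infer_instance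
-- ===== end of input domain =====

-- B replaces A's rescan-and-reslice loop by one left-to-right pass with a pending-run flag (objective: faster, O(n) vs O(n^2)).

-- ===== PORT A =====
-- shots[shot_idx % 3]; index is always < 3, so getD is exact
def aShot (k : Nat) : Char := ['R', 'G', 'B'].getD (k % 3) ' '

-- inner while: number of leading balloons equal to the current shot
def aSkip (bs : List Char) (shot : Char) : Nat :=
  match bs with
  | [] => 0
  | c :: r => if c == shot then aSkip r shot + 1 else 0

-- outer while: slice off the first balloon_idx+1 balloons, count shots
def aLoop : List Char → Nat → Nat
  | [], k => k
  | c :: r, k => aLoop ((c :: r).drop (aSkip (c :: r) (aShot k) + 1)) (k + 1)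
termination_by bs _ => bs.length
decreasing_by simp [List.length_drop]

def get_arrows_to_pop_balloons (balloons : String) : Int :=
  (aLoop balloons.toList 0 : Int)

-- ===== PORT B =====
-- 'RGB'[count % 3]; index is always < 3, so getD is exact
def bShot (k : Nat) : Char := "RGB".toList.getD (k % 3) ' '

-- one step of the fold: state = (shots fired, pending-run flag)
def bStep (st : Nat × Bool) (c : Char) : Nat × Bool :=
  if c == bShot st.1 then (st.1, true) else (st.1 + 1, false)

def get_arrows_to_pop_balloons_alt (balloons : String) : Int :=
  let st := balloons.toList.foldl bStep (0, false)
  ((if st.2 then st.1 + 1 else st.1 : Nat) : Int)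

-- ===== PRECONDITION & SPEC =====
def Spec_get_arrows_to_pop_balloons (balloons : String) (out : Int) : Prop := out = get_arrows_to_pop_balloons_alt balloons
instance (balloons : String) (out : Int) : Decidable (Spec_get_arrows_to_pop_balloons balloons out) := by unfold Spec_get_arrows_to_pop_balloons; infer_instance

-- ===== CLAIM (what is proved, stated in full; the proofs are below) =====
def Claim_equal_get_arrows_to_pop_balloons : Prop := ∀ (balloons : String), Dom_get_arrows_to_pop_balloons balloons → Spec_get_arrows_to_pop_balloons balloons (get_arrows_to_pop_balloons balloons)

-- ===== LEMMAS AND PROOFS =====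

theorem aLoop_nil (k : Nat) : aLoop [] k = k := by
  unfold aLoop
  rfl

theorem aLoop_cons (c : Char) (r : List Char) (k : Nat) :
    aLoop (c :: r) k = aLoop ((c :: r).drop (aSkip (c :: r) (aShot k) + 1)) (k + 1) := by
  rw [aLoop.eq_def]

theorem shot_eq (k : Nat) : bShot k = aShot k := by
  have h : k % 3 = 0 ∨ k % 3 = 1 ∨ k % 3 = 2 := by omega
  rcases h with h | h | h <;> simp [aShot, bShot, h]

-- bStep ignores the pending flag of its input state
theorem bStep_flag (k : Nat) (b b' : Bool) (c : Char) : bStep (k, b) c = bStep (k, b') c := by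
  simp [bStep]

theorem main_lemma : ∀ (n : Nat) (bs : List Char) (k : Nat), bs.length ≤ n →
    aLoop bs k = (let st := bs.foldl bStep (k, false); if st.2 then st.1 + 1 else st.1) := by
  intro n
  induction n with
  | zero =>
    intro bs k h
    have hbs : bs = [] := List.eq_nil_of_length_eq_zero (Nat.le_zero.mp h)
    subst hbs; simp [aLoop_nil]
  | succ n ih =>
    intro bs k h
    cases bs with
    | nil => simp [aLoop_nil]
    | cons c r =>
      by_cases hc : (c == aShot k) = true
      · -- head matches the current shot
        cases r with
        | nil =>
          rw [aLoop_cons]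
          simp [aSkip, hc, aLoop_nil, bStep, shot_eq]
        | cons c' r' =>
          have hsk : aSkip (c :: c' :: r') (aShot k) = aSkip (c' :: r') (aShot k) + 1 := by
            simp [aSkip, hc]
          have step1 : aLoop (c :: c' :: r') k
              = aLoop ((c' :: r').drop (aSkip (c' :: r') (aShot k) + 1)) (k + 1) := by
            rw [aLoop_cons, hsk, List.drop_succ_cons]
          have hlen : (c' :: r').length ≤ n := by
            simpa using Nat.succ_le_succ_iff.mp (by simpa using h)
          have ihr := ih (c' :: r') k hlen
          rw [aLoop_cons] at ihr
          rw [step1, ihr]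
          -- both folds start with the same first step (pending flag is ignored)
          simp only [List.foldl_cons]
          have hstep : bStep (k, false) c = (k, true) := by
            simp [bStep, shot_eq, hc]
          rw [hstep, bStep_flag k true false c']
      · -- head does not match: the shot pops it
        have step1 : aLoop (c :: r) k = aLoop r (k + 1) := by
          rw [aLoop_cons]; simp [aSkip, hc]
        have hlen : r.length ≤ n := by
          simpa using Nat.succ_le_succ_iff.mp (by simpa using h)
        have ihr := ih r (k + 1) hlen
        rw [step1, ihr]
        simp only [List.foldl_cons]
        have hstep : bStep (k, false) c = (k + 1, false) := by
          simp [bStep, shot_eq, hc]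
        rw [hstep]

-- ===== VERDICT (by name: the statement is the Claim_ definition above) =====
theorem get_arrows_to_pop_balloons_spec : Claim_equal_get_arrows_to_pop_balloons := by
  intro balloons _
  unfold Spec_get_arrows_to_pop_balloons get_arrows_to_pop_balloons get_arrows_to_pop_balloons_alt
  rw [main_lemma balloons.toList.length balloons.toList 0 (le_refl _)]
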